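-- pv_equiv track=rewrite | github.com/bschukin/aice | src/utils/md.py | insert_section_into_markdown
-- ===== SOURCE A (Python) =====
-- def insert_section_into_markdown(content, target_header, new_content, delete_target_header: bool = False) -> str:
--     """
--     Вставляет новый раздел после указанного заголовка в Markdown содержимое.
--
--     :param content: Строка с содержимым MD файла
--     :param target_header: Заголовок, после которого нужно вставить новый раздел (например, "# Схема")
--     :param new_content: Содержимое нового раздела
--     :param delete_target_header
--     :return: Модифицированное содержимое
--     """
--     lines = content.split('\n')
--     new_section = f"\n{new_content}\n"
--     result = []
--     found = False
--
--     for line in lines: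
--         if line.strip() == target_header and not found:
--             if not delete_target_header:
--                 result.append(line)
--             result.append(new_section)
--             found = True
--         else:
--             result.append(line)
--
--     return '\n'.join(result)
-- ===== SOURCE B (Python) =====
-- def insert_section_into_markdown(content, target_header, new_content, delete_target_header: bool = False) -> str:
--     lines = content.split('\n')
--     i = next((k for k, line in enumerate(lines) if line.strip() == target_header), None)
--     if i is None:
--         return '\n'.join(lines)
--     head = lines[:i] if delete_target_header else lines[:i + 1]
--     return '\n'.join(head + [f"\n{new_content}\n"] + lines[i + 1:])
-- ===== Notes on version B (the rewrite author's own statement) =====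
-- stated objective: alternative
-- what changed: Replaces the flag-driven accumulation loop (appending every line while tracking a 'found' flag) by locate-then-splice: find the first matching line's index with next() over enumerate, then build the result from slices around it.
import Mathlib
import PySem

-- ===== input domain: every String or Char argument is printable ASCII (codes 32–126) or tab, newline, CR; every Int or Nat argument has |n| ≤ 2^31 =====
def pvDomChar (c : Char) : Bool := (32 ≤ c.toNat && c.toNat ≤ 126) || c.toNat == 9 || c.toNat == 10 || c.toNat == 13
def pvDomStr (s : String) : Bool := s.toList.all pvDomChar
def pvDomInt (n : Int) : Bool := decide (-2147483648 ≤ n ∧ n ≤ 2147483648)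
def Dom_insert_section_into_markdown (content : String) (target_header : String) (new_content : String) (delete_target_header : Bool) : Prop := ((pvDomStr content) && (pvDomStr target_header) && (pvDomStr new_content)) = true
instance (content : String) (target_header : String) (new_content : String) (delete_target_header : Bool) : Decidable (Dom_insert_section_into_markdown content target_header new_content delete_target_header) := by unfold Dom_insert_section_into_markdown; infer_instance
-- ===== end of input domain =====

-- B replaces A's flag-driven accumulation loop by locate-then-splice (find the first
-- matching line's index, then rebuild from slices); same output, alternative structure.

-- ===== PORT A =====
def insert_section_into_markdown (content : String) (target_header : String) (new_content : String) (delete_target_header : Bool) : String :=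
  let lines := (PySem.Str.split? content "\n").getD []
  let new_section := "\n" ++ new_content ++ "\n"
  let st := lines.foldl (fun (st : List String × Bool) line =>
    if PySem.Str.strip line == target_header && !st.2 then
      ((if !delete_target_header then st.1 ++ [line] else st.1) ++ [new_section], true)
    else
      (st.1 ++ [line], st.2)) ([], false)
  PySem.Str.join "\n" st.1

-- ===== PORT B =====
def insert_section_into_markdown_alt (content : String) (target_header : String) (new_content : String) (delete_target_header : Bool) : String :=
  let lines := (PySem.Str.split? content "\n").getD []
  match lines.findIdx? (fun line => PySem.Str.strip line == target_header) with
  | none => PySem.Str.join "\n" lines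
  | some i =>
    let head := if delete_target_header then lines.take i else lines.take (i + 1)
    PySem.Str.join "\n" (head ++ ["\n" ++ new_content ++ "\n"] ++ lines.drop (i + 1))

-- ===== PRECONDITION & SPEC =====
def Spec_insert_section_into_markdown (content : String) (target_header : String) (new_content : String) (delete_target_header : Bool) (out : String) : Prop := out = insert_section_into_markdown_alt content target_header new_content delete_target_header
instance (content : String) (target_header : String) (new_content : String) (delete_target_header : Bool) (out : String) : Decidable (Spec_insert_section_into_markdown content target_header new_content delete_target_header out) := by unfold Spec_insert_section_into_markdown; infer_instance

-- ===== CLAIM (what is proved, stated in full; the proofs are below) =====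
def Claim_equal_insert_section_into_markdown : Prop := ∀ (content : String) (target_header : String) (new_content : String) (delete_target_header : Bool), Dom_insert_section_into_markdown content target_header new_content delete_target_header → Spec_insert_section_into_markdown content target_header new_content delete_target_header (insert_section_into_markdown content target_header new_content delete_target_header)

-- ===== LEMMAS AND PROOFS =====

-- A's loop step, abstracted over the predicate (strip line == target) as p,
-- the section string sec and the delete flag.
def pvStepA (p : String → Bool) (sec : String) (del : Bool) (st : List String × Bool) (line : String) : List String × Bool :=
  if p line && !st.2 then
    ((if !del then st.1 ++ [line] else st.1) ++ [sec], true)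
  else
    (st.1 ++ [line], st.2)

-- once found, A's loop just appends every remaining line
theorem pvFoldA_found (p : String → Bool) (sec : String) (del : Bool) :
    ∀ (ls : List String) (acc : List String),
      ls.foldl (pvStepA p sec del) (acc, true) = (acc ++ ls, true) := by
  intro ls
  induction ls with
  | nil => intro acc; simp
  | cons l ls ih =>
    intro acc
    simp only [List.foldl_cons, pvStepA, Bool.not_true, Bool.and_false, Bool.false_eq_true,
      if_false, ih]
    simp

-- main invariant: the not-yet-found loop equals the locate-then-splice result
theorem pvFoldA_main (p : String → Bool) (sec : String) (del : Bool) :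
    ∀ (ls : List String) (acc : List String),
      (ls.foldl (pvStepA p sec del) (acc, false)).1 =
        match ls.findIdx? p with
        | none => acc ++ ls
        | some i =>
          acc ++ (if del then ls.take i else ls.take (i + 1)) ++ [sec] ++ ls.drop (i + 1) := by
  intro ls
  induction ls with
  | nil => intro acc; simp
  | cons l ls ih =>
    intro acc
    by_cases hp : p l = true
    · simp only [List.foldl_cons, pvStepA, hp, Bool.not_false, Bool.and_true, if_true,
        pvFoldA_found, List.findIdx?_cons, if_pos hp]
      cases del <;> simp
    · simp only [List.foldl_cons, pvStepA, hp, Bool.false_and, Bool.false_eq_true, if_false,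
        ih (acc ++ [l]), List.findIdx?_cons, if_neg hp]
      cases h : ls.findIdx? p with
      | none => simp
      | some i => cases del <;> simp [List.take_succ_cons]

-- ===== VERDICT (by name: the statement is the Claim_ definition above) =====
theorem insert_section_into_markdown_spec : Claim_equal_insert_section_into_markdown := by
  intro content target_header new_content delete_target_header _
  unfold Spec_insert_section_into_markdown insert_section_into_markdown insert_section_into_markdown_alt
  have h := pvFoldA_main (fun line => PySem.Str.strip line == target_header)
    ("\n" ++ new_content ++ "\n") delete_target_header ((PySem.Str.split? content "\n").getD []) []
  simp only [List.nil_append] at h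
  cases hf : ((PySem.Str.split? content "\n").getD []).findIdx? (fun line => PySem.Str.strip line == target_header) with
  | none =>
    simp only [hf] at h
    simp only [hf]
    exact congrArg (PySem.Str.join "\n") h
  | some i =>
    simp only [hf] at h
    simp only [hf]
    cases delete_target_header <;>
      simp only [Bool.false_eq_true, if_false, if_true, List.append_assoc] at h ⊢ <;>
      exact congrArg (PySem.Str.join "\n") h
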